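-- pv_equiv track=rewrite | github.com/OlhaNoda/Python_course_for_beginners | 2021_02/lesson22_130221/shift_digits_loop.py | shift_digits_right
-- ===== SOURCE A (Python) =====
-- def count_places(number: int) -> int:
--     if not isinstance(number, int):
--         raise TypeError(f'The function {count_places.__name__} works only with number: int')
--     if number < 0:
--         raise ValueError(f'The function {count_places.__name__} works only with number > 0')
--     places = 0
--     while number >= 1:
--         number //= 10
--         places += 1
--     return places
--
-- def shift_digits_right(number: int, step: int = 1) -> int:
--     if not isinstance(number, int) or not isinstance(step, int):
--         raise TypeError(f'The function {shift_digits_right.__name__} works only with number: int, step: int')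
--     if step < 0:
--         raise ValueError(f'The function {shift_digits_right.__name__} works only with step >= 0')
--     places = count_places(number)
--     while step > 0:
--         last_digit = number % 10  # определение последней цифры в числе
--         number //= 10  # отбрасывание последней цифры из числа
--         number += last_digit * 10**(places-1)  # изменение числа - последняя цифра становится первой
--         step -= 1
--     return number
-- ===== SOURCE B (Python) =====
-- def shift_digits_right(number: int, step: int = 1) -> int:
--     # digit count: smallest d >= 1 with number < 10**d
--     d = 1
--     while 10 ** d <= number:
--         d += 1
--     k = step % d  # rotating a d-digit number has period d
--     if k == 0:
--         return number
--     p = 10 ** k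
--     return (number % p) * 10 ** (d - k) + number // p
-- ===== Notes on version B (the rewrite author's own statement) =====
-- stated objective: faster
-- what changed: Instead of looping step times and moving one digit per iteration, B reduces step modulo the digit count (rotation period) and performs the whole rotation with one divmod by 10**k, splitting the number into low/high parts.
-- outside the precondition, e.g. on shift_digits_right(0, 1): A returns 0.0, B returns 0; on shift_digits_right(-1, 1): A raises ValueError, B returns -1; on shift_digits_right(-5, 1): A raises ValueError, B returns -5
import Mathlib
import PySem

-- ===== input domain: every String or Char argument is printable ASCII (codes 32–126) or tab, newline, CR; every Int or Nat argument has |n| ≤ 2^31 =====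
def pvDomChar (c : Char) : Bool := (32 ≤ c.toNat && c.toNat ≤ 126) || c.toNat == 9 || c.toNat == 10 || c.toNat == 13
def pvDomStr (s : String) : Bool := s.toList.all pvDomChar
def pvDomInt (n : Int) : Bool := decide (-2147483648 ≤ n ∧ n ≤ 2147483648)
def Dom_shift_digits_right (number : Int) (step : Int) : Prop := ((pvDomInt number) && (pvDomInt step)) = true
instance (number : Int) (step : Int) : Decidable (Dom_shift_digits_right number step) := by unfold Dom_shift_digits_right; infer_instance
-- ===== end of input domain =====

-- B replaces A's step-by-step digit rotation by one split at 10**(step mod digit-count); a timing run measured it faster.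


-- ===== PORT A =====
-- count_places: while number >= 1: number //= 10; places += 1
def pvCountLoop (number : Int) (places : Int) : Int :=
  if h : 1 ≤ number then pvCountLoop (PySem.Int.floordiv number 10) (places + 1) else places
termination_by number.toNat
decreasing_by
  rw [PySem.Int.floordiv_eq_ediv_of_pos (by norm_num : (0:Int) < 10)]
  omega

def count_places (number : Int) : Int := pvCountLoop number 0

-- while step > 0: last = number % 10; number //= 10; number += last * 10**(places-1); step -= 1
-- (10**(places-1) is exact for places ≥ 1; Pre_ guarantees this — for number = 0 with step > 0 Python produces a float)
def pvShiftLoop (number : Int) (places : Int) (step : Int) : Int :=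
  if 0 < step then
    pvShiftLoop (PySem.Int.floordiv number 10 + PySem.Int.mod number 10 * 10 ^ (places - 1).toNat)
      places (step - 1)
  else number
termination_by step.toNat
decreasing_by omega

def shift_digits_right (number : Int) (step : Int) : Int :=
  pvShiftLoop number (count_places number) step

-- ===== PORT B =====
-- d = 1; while 10 ** d <= number: d += 1
def pvPlacesLoop (number : Int) (d : Int) : Int :=
  if (10:Int) ^ d.toNat ≤ number then pvPlacesLoop number (d + 1) else d
termination_by (number - d).toNat
decreasing_by
  have hp : (d.toNat : Int) < (10:Int) ^ d.toNat := by
    exact_mod_cast Nat.lt_pow_self (by norm_num)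
  omega

def shift_digits_right_alt (number : Int) (step : Int) : Int :=
  let d := pvPlacesLoop number 1
  let k := PySem.Int.mod step d
  if k = 0 then number
  else
    let p : Int := 10 ^ k.toNat
    PySem.Int.mod number p * 10 ^ (d - k).toNat + PySem.Int.floordiv number p

-- ===== PRECONDITION & SPEC =====
-- Pre_ excludes number < 0 and step < 0, on which A raises ValueError, and number = 0 with
-- step > 0, on which A returns the float 0.0 (not an int: 10**(places-1) is 10**(-1) there).
def Pre_shift_digits_right (number : Int) (step : Int) : Prop :=
  0 ≤ number ∧ 0 ≤ step ∧ (number = 0 → step = 0)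
instance (number : Int) (step : Int) : Decidable (Pre_shift_digits_right number step) := by
  unfold Pre_shift_digits_right; infer_instance

def pvWitness_shift_digits_right : Int × Int := (123, 4)

def Spec_shift_digits_right (number : Int) (step : Int) (out : Int) : Prop := out = shift_digits_right_alt number step
instance (number : Int) (step : Int) (out : Int) : Decidable (Spec_shift_digits_right number step out) := by unfold Spec_shift_digits_right; infer_instance

-- ===== CLAIM (what is proved, stated in full; the proofs are below) =====
def Claim_equal_shift_digits_right : Prop := ∀ (number : Int) (step : Int), Dom_shift_digits_right number step → Pre_shift_digits_right number step → Spec_shift_digits_right number step (shift_digits_right number step)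

-- ===== LEMMAS AND PROOFS =====

-- A's single rotation step, written with Int's ediv/emod (= Python's // and % for the positive divisor 10)
def pvRot (d : Nat) (n : Int) : Int := n / 10 + n % 10 * 10 ^ (d - 1)

lemma pvRot_nonneg (d : Nat) (n : Int) (h0 : 0 ≤ n) : 0 ≤ pvRot d n := by
  have h1 : 0 ≤ n / 10 := Int.ediv_nonneg h0 (by norm_num)
  have h2 : 0 ≤ n % 10 := Int.emod_nonneg n (by norm_num)
  have h3 : (0:Int) ≤ 10 ^ (d - 1) := by positivity
  unfold pvRot; nlinarith

lemma pvRot_lt (d : Nat) (hd : 1 ≤ d) (n : Int) (_h0 : 0 ≤ n) (hn : n < 10 ^ d) :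
    pvRot d n < 10 ^ d := by
  have hpow : (10:Int) ^ d = 10 ^ (d - 1) * 10 := by
    rw [← pow_succ]; congr 1; omega
  have hP : (0:Int) < 10 ^ (d - 1) := by positivity
  have hqr : 10 * (n / 10) + n % 10 = n := Int.mul_ediv_add_emod n 10
  have hr1 : 0 ≤ n % 10 := Int.emod_nonneg n (by norm_num)
  have hr2 : n % 10 < 10 := Int.emod_lt_of_pos n (by norm_num)
  have hq : n / 10 < 10 ^ (d - 1) := by nlinarith
  have h9 : n % 10 * 10 ^ (d - 1) ≤ 9 * 10 ^ (d - 1) :=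
    mul_le_mul_of_nonneg_right (by omega) (le_of_lt hP)
  unfold pvRot; nlinarith

-- one rotation advances the split point: rotating once and then splitting at 10^k
-- equals splitting the original number at 10^(k+1)
lemma pvRot_split (d k : Nat) (hk : k + 1 ≤ d) (n : Int) (_h0 : 0 ≤ n) :
    pvRot d n % 10 ^ k * 10 ^ (d - k) + pvRot d n / 10 ^ k
      = n % 10 ^ (k + 1) * 10 ^ (d - (k + 1)) + n / 10 ^ (k + 1) := by
  have hqr : 10 * (n / 10) + n % 10 = n := Int.mul_ediv_add_emod n 10
  set q : Int := n / 10 with hq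
  set u : Int := n % 10 with hu
  have hu1 : 0 ≤ u := Int.emod_nonneg n (by norm_num)
  have hu2 : u < 10 := Int.emod_lt_of_pos n (by norm_num)
  have hPk : (0:Int) < 10 ^ k := by positivity
  have hQR : 10 ^ k * (q / 10 ^ k) + q % 10 ^ k = q := Int.mul_ediv_add_emod q (10 ^ k)
  have hR1 : 0 ≤ q % 10 ^ k := Int.emod_nonneg q (ne_of_gt hPk)
  have hR2 : q % 10 ^ k < 10 ^ k := Int.emod_lt_of_pos q hPk
  -- pow identities
  have hA : (10:Int) ^ (d - 1) = 10 ^ (d - (k + 1)) * 10 ^ k := by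
    rw [← pow_add]; congr 1; omega
  have hB : (10:Int) ^ (d - k) = 10 ^ (d - (k + 1)) * 10 := by
    rw [← pow_succ]; congr 1; omega
  have hC : (10:Int) ^ (k + 1) = 10 ^ k * 10 := pow_succ 10 k
  -- the components of the rotated number
  have e1 : pvRot d n % 10 ^ k = q % 10 ^ k := by
    unfold pvRot; rw [← hq, ← hu, hA, ← mul_assoc]
    exact Int.add_mul_emod_self_right q (u * 10 ^ (d - (k + 1))) (10 ^ k)
  have e2 : pvRot d n / 10 ^ k = q / 10 ^ k + u * 10 ^ (d - (k + 1)) := by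
    unfold pvRot; rw [← hq, ← hu, hA, ← mul_assoc]
    exact Int.add_mul_ediv_right q (u * 10 ^ (d - (k + 1))) (by omega)
  -- the components of n at 10^(k+1)
  have hsum : (10:Int) ^ (k + 1) * (q / 10 ^ k) + (10 * (q % 10 ^ k) + u) = n := by
    rw [hC]; nlinarith [hQR, hqr]
  have hlo1 : (0:Int) ≤ 10 * (q % 10 ^ k) + u := by omega
  have hlo2 : 10 * (q % 10 ^ k) + u < 10 ^ (k + 1) := by rw [hC]; omega
  have e3 : n / 10 ^ (k + 1) = q / 10 ^ k := by
    conv_lhs => rw [← hsum]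
    rw [mul_comm ((10:Int) ^ (k + 1)) (q / 10 ^ k), add_comm]
    rw [Int.add_mul_ediv_right _ _ (by positivity : ((10:Int) ^ (k + 1)) ≠ 0)]
    rw [Int.ediv_eq_zero_of_lt hlo1 hlo2, zero_add]
  have e4 : n % 10 ^ (k + 1) = 10 * (q % 10 ^ k) + u := by
    conv_lhs => rw [← hsum]
    rw [mul_comm ((10:Int) ^ (k + 1)) (q / 10 ^ k), add_comm]
    rw [Int.add_mul_emod_self_right]
    exact Int.emod_eq_of_lt hlo1 hlo2
  rw [e1, e2, e3, e4, hB]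
  ring

-- splitting at 10^d (resp. 10^0) is the identity
lemma pvSplit_self (d : Nat) (n : Int) (h0 : 0 ≤ n) (hn : n < 10 ^ d) :
    n % 10 ^ d * 10 ^ (d - d) + n / 10 ^ d = n := by
  rw [Int.emod_eq_of_lt h0 hn, Int.ediv_eq_zero_of_lt h0 hn]
  simp

lemma pvCountLoop_spec : ∀ (n p : Int), 0 ≤ n →
    ∃ e : Nat, pvCountLoop n p = p + e ∧ n < 10 ^ e ∧ (1 ≤ n → 1 ≤ e ∧ 10 ^ (e - 1) ≤ n) := by
  intro n p
  induction n, p using pvCountLoop.induct with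
  | case1 n p h ih =>
    intro _
    have hfd : PySem.Int.floordiv n 10 = n / 10 :=
      PySem.Int.floordiv_eq_ediv_of_pos (by norm_num)
    have hm0 : 0 ≤ n / 10 := Int.ediv_nonneg (by omega) (by norm_num)
    obtain ⟨e', he, hlt, hge⟩ := ih (by rw [hfd]; exact hm0)
    have hqr : 10 * (n / 10) + n % 10 = n := Int.mul_ediv_add_emod n 10
    have hr1 : 0 ≤ n % 10 := Int.emod_nonneg n (by norm_num)
    have hr2 : n % 10 < 10 := Int.emod_lt_of_pos n (by norm_num)
    refine ⟨e' + 1, ?_, ?_, fun _ => ⟨by omega, ?_⟩⟩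
    · rw [pvCountLoop, dif_pos h, he]; push_cast; ring
    · have : (10:Int) ^ (e' + 1) = 10 * 10 ^ e' := by rw [pow_succ]; ring
      rw [hfd] at hlt; nlinarith
    · simp only [Nat.add_sub_cancel]
      rw [hfd] at he hlt hge
      by_cases hm1 : 1 ≤ n / 10
      · obtain ⟨he1, hgb⟩ := hge hm1
        have : (10:Int) ^ e' = 10 * 10 ^ (e' - 1) := by
          rw [← pow_succ']; congr 1; omega
        nlinarith
      · have hz : n / 10 = 0 := by omega
        have : pvCountLoop (0:Int) (p + 1) = p + 1 := by rw [pvCountLoop, dif_neg (by norm_num)]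
        rw [hz] at he
        have he0 : e' = 0 := by omega
        rw [he0]; norm_num; omega
  | case2 n p h =>
    intro h0
    refine ⟨0, by rw [pvCountLoop, dif_neg h]; norm_num, by norm_num; omega, fun h1 => absurd h1 h⟩

lemma pvPlacesLoop_eq (e : Nat) (_he : 1 ≤ e) : ∀ (n d : Int), n < 10 ^ e → 1 ≤ d → d ≤ (e : Int) →
    (∀ j : Nat, d ≤ (j : Int) → j < e → (10:Int) ^ j ≤ n) → pvPlacesLoop n d = (e : Int) := by
  intro n d
  induction d using pvPlacesLoop.induct (number := n) with
  | case1 d hg ih =>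
    intro hlt hd1 hde hall
    have hdt : (d.toNat : Int) = d := Int.toNat_of_nonneg (by omega)
    have hne : d ≠ (e : Int) := by
      intro hcontra
      have : d.toNat = e := by omega
      rw [this] at hg; omega
    rw [pvPlacesLoop, if_pos hg]
    exact ih hlt (by omega) (by omega) (fun j hj1 hj2 => hall j (by omega) hj2)
  | case2 d hg =>
    intro hlt hd1 hde hall
    have hdt : (d.toNat : Int) = d := Int.toNat_of_nonneg (by omega)
    rw [pvPlacesLoop, if_neg hg]
    by_contra hne
    have hjlt : d.toNat < e := by omega
    exact hg (hall d.toNat (by omega) hjlt)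

lemma pvShiftLoop_eq (d : Nat) (hd : 1 ≤ d) : ∀ (s : Nat) (n : Int), 0 ≤ n → n < 10 ^ d →
    pvShiftLoop n (d : Int) (s : Int)
      = n % 10 ^ (s % d) * 10 ^ (d - s % d) + n / 10 ^ (s % d) := by
  intro s
  induction s with
  | zero =>
    intro n h0 hn
    rw [pvShiftLoop, if_neg (by decide)]
    simp [Nat.zero_mod]
  | succ s ih =>
    intro n h0 hn
    rw [pvShiftLoop, if_pos (by exact_mod_cast Nat.succ_pos s)]
    have hstep : ((s + 1 : Nat) : Int) - 1 = (s : Int) := by push_cast; ring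
    have hbody : PySem.Int.floordiv n 10 + PySem.Int.mod n 10 * 10 ^ (((d : Int)) - 1).toNat
        = pvRot d n := by
      rw [PySem.Int.floordiv_eq_ediv_of_pos (by norm_num : (0:Int) < 10),
        PySem.Int.mod_eq_emod_of_pos (by norm_num : (0:Int) < 10)]
      unfold pvRot
      rw [show (((d : Int)) - 1).toNat = d - 1 from by omega]
    rw [hstep, hbody, ih (pvRot d n) (pvRot_nonneg d n h0) (pvRot_lt d hd n h0 hn)]
    set k := s % d with hk
    have hklt : k < d := Nat.mod_lt _ (by omega)
    have hmod : (s + 1) % d = (k + 1) % d := by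
      conv_lhs => rw [← Nat.mod_add_mod]
    by_cases hke : k + 1 = d
    · rw [pvRot_split d k (by omega) n h0, hke, hmod, hke, Nat.mod_self]
      rw [pvSplit_self d n h0 hn]
      simp
    · rw [pvRot_split d k (by omega) n h0, hmod, Nat.mod_eq_of_lt (by omega)]

-- B's port with its lets unfolded (definitional)
lemma pvAlt_def (number step : Int) : shift_digits_right_alt number step =
    if PySem.Int.mod step (pvPlacesLoop number 1) = 0 then number
    else PySem.Int.mod number (10 ^ (PySem.Int.mod step (pvPlacesLoop number 1)).toNat)
        * 10 ^ (pvPlacesLoop number 1 - PySem.Int.mod step (pvPlacesLoop number 1)).toNat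
        + PySem.Int.floordiv number (10 ^ (PySem.Int.mod step (pvPlacesLoop number 1)).toNat) := rfl

-- ===== VERDICT (by name: the statement is the Claim_ definition above) =====
theorem shift_digits_right_spec : Claim_equal_shift_digits_right := by
  intro number step _ hpre
  obtain ⟨h0, hs, hz⟩ := hpre
  unfold Spec_shift_digits_right
  by_cases hn0 : number = 0
  · have hst : step = 0 := hz hn0
    subst hn0; subst hst
    have hA0 : shift_digits_right 0 0 = 0 := by
      unfold shift_digits_right count_places
      rw [pvCountLoop, dif_neg (by norm_num), pvShiftLoop, if_neg (by norm_num)]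
    have hp : pvPlacesLoop 0 1 = 1 := by
      rw [pvPlacesLoop]; rw [if_neg (by decide)]
    have hB0 : shift_digits_right_alt 0 0 = 0 := by
      rw [pvAlt_def, hp, if_pos (by decide)]
    rw [hA0, hB0]
  · have h1 : (1:Int) ≤ number := by omega
    obtain ⟨e, hcp, hlt, hrest⟩ := pvCountLoop_spec number 0 h0
    obtain ⟨he1, hle⟩ := hrest h1
    have hplaces : pvPlacesLoop number 1 = (e : Int) :=
      pvPlacesLoop_eq e he1 number 1 hlt (by norm_num) (by exact_mod_cast he1)
        (fun j hj1 hj2 =>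
          le_trans (pow_le_pow_right₀ (by norm_num : (1:Int) ≤ 10) (by omega : j ≤ e - 1)) hle)
    set s : Nat := step.toNat with hsdef
    have hscast : step = (s : Int) := (Int.toNat_of_nonneg hs).symm
    -- A's side
    have hA : shift_digits_right number step
        = number % 10 ^ (s % e) * 10 ^ (e - s % e) + number / 10 ^ (s % e) := by
      unfold shift_digits_right count_places
      rw [hcp, zero_add, hscast]
      exact pvShiftLoop_eq e he1 s number h0 hlt
    -- B's side
    have hke : (0:Int) < (e : Int) := by exact_mod_cast he1
    have hmodcast : PySem.Int.mod step (e : Int) = ((s % e : Nat) : Int) := by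
      rw [PySem.Int.mod_eq_emod_of_pos hke, hscast]
      push_cast
      rfl
    rw [hA, pvAlt_def, hplaces, hmodcast]
    by_cases hk0 : s % e = 0
    · rw [if_pos (by exact_mod_cast congrArg (Nat.cast : Nat → Int) hk0), hk0]
      simp
    · rw [if_neg (by exact_mod_cast hk0)]
      rw [PySem.Int.mod_eq_emod_of_pos (by positivity),
        PySem.Int.floordiv_eq_ediv_of_pos (by positivity)]
      have ht1 : (((s % e : Nat) : Int)).toNat = s % e := by omega
      have ht2 : ((e : Int) - ((s % e : Nat) : Int)).toNat = e - s % e := by omega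
      rw [ht1, ht2]
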